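-- pv_equiv track=rewrite | github.com/akapkotel/Python-RTS-game | utils/functions.py | get_enemies
-- ===== SOURCE A (Python) =====
-- from typing import Any, Dict, Iterable, List, Sequence, Tuple
--
-- def get_enemies(war: int) -> Tuple[int, int]:
--     """
--     Since each Player id attribute is a power of 2, id's can
--     be combined to sum, being an unique identifier, for eg.
--     Player with id 8 and Player with id 128 make unique sum
--     136. To save pairs of hostile Players you can sum their
--     id's and this functions allows to retrieve pair from the
--     saved value. Limit of Players in game is 16, since 2^32
--     gives 8589934592, which is highest id checked by functions.
--     """
--     index = 8589934592  # 2 to power of 32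
--     while index > 2:
--         if war < index:
--             index = index >> 1
--         else:
--             break
--     return index, war - index
-- ===== SOURCE B (Python) =====
-- def get_enemies(war: int):
--     index = 2 if war < 2 else min(8589934592, 1 << (war.bit_length() - 1))
--     return index, war - index
-- ===== Notes on version B (the rewrite author's own statement) =====
-- stated objective: idiomatic
-- what changed: Replaced A's downward-shifting while loop with a loop-free closed form: the highest power of two not exceeding war is computed directly from war.bit_length(), with the same lower floor (for small war) and upper ceiling that the loop guarantees.
import Mathlib
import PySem

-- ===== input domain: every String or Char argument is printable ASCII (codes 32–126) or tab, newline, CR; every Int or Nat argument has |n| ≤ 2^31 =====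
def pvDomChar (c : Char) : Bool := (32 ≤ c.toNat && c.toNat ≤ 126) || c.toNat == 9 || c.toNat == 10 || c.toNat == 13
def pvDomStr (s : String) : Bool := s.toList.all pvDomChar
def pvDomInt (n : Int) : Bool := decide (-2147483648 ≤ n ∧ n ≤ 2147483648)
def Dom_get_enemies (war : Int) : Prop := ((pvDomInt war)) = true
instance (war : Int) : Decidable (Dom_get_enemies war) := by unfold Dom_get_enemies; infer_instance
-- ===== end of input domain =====

-- B replaces A's downward-shifting while loop by a loop-free closed form from bit_length (idiomatic).

-- ===== PORT A =====
-- the while loop of A; the fuel only makes the recursion total (the loop shifts at most 32 times)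
def get_enemies_loop (fuel : Nat) (index war : Int) : Int :=
  match fuel with
  | 0 => index
  | f + 1 =>
    if index > 2 then
      if war < index then get_enemies_loop f (index >>> (1:Nat)) war
      else index
    else index

def get_enemies (war : Int) : Int × Int :=
  let index := get_enemies_loop 40 8589934592 war
  (index, war - index)

-- ===== PORT B =====
def get_enemies_alt (war : Int) : Int × Int :=
  let index : Int := if war < 2 then 2 else min 8589934592 ((1 : Int) <<< (PySem.Int.bitLength war - 1))
  (index, war - index)

-- ===== PRECONDITION & SPEC =====
def Spec_get_enemies (war : Int) (out : Int × Int) : Prop := out = get_enemies_alt war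
instance (war : Int) (out : Int × Int) : Decidable (Spec_get_enemies war out) := by unfold Spec_get_enemies; infer_instance

-- ===== CLAIM (what is proved, stated in full; the proofs are below) =====
def Claim_equal_get_enemies : Prop := ∀ (war : Int), Dom_get_enemies war → Spec_get_enemies war (get_enemies war)

-- ===== LEMMAS AND PROOFS =====

lemma pv_bitLength_eq_of_bracket (war : Int) (k : Nat)
    (h1 : (2:Int) ^ (k + 1) ≤ war) (h2 : war < (2:Int) ^ (k + 2)) :
    PySem.Int.bitLength war = k + 2 := by
  have hp : (0:Int) < 2^(k+1) := by positivity
  have hne : war ≠ 0 := by omega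
  have hlo : 2 ^ (k + 1) ≤ war.natAbs := by
    have : ((2^(k+1):Nat):Int) ≤ war := by push_cast; exact h1
    omega
  have hhi : war.natAbs < 2 ^ (k + 2) := by
    have : war < ((2^(k+2):Nat):Int) := by push_cast; exact h2
    omega
  have a := PySem.Int.two_pow_bitLength_le war hne
  have b := PySem.Int.lt_two_pow_bitLength war
  set bl := PySem.Int.bitLength war with hbl
  have h3 : k + 1 < bl := by
    by_contra h
    have : (2:Nat)^bl ≤ 2^(k+1) := Nat.pow_le_pow_right (by norm_num) (by omega)
    omega
  have h4 : bl - 1 < k + 2 := by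
    by_contra h
    have : (2:Nat)^(k+2) ≤ 2^(bl-1) := Nat.pow_le_pow_right (by norm_num) (by omega)
    omega
  omega

-- once war ≥ index the loop breaks (or is already at 2) and returns index
lemma pv_loop_break (f k : Nat) (war : Int) (h : (2:Int)^(k+1) ≤ war) :
    get_enemies_loop f ((2:Int)^(k+1)) war = 2^(k+1) := by
  cases f with
  | zero => rfl
  | succ g =>
    unfold get_enemies_loop
    split_ifs with h1 h2
    · exact absurd h2 (not_lt.mpr h)
    · rfl
    · rfl

lemma pv_loop_char (k : Nat) : ∀ (fuel : Nat) (war : Int), k ≤ fuel → war < (2:Int) ^ (k + 1) →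
    get_enemies_loop fuel ((2:Int) ^ (k + 1)) war =
      if war < 2 then 2 else (2:Int) ^ (PySem.Int.bitLength war - 1) := by
  induction k with
  | zero =>
    intro fuel war _ hw
    have : war < 2 := by norm_num at hw; omega
    rw [if_pos this]
    cases fuel with
    | zero => norm_num [get_enemies_loop]
    | succ f => norm_num [get_enemies_loop]
  | succ k ih =>
    intro fuel war hf hw
    obtain ⟨f, rfl⟩ : ∃ f, fuel = f + 1 := ⟨fuel - 1, by omega⟩
    have hgt : ((2:Int) ^ (k + 1 + 1)) > 2 := by
      have : (2:Int)^1 < 2^(k+2) := by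
        apply pow_lt_pow_right₀ (by norm_num) (by omega)
      simpa using this
    unfold get_enemies_loop
    rw [if_pos hgt, if_pos hw]
    have hshift : ((2:Int)^(k+1+1)) >>> (1:Nat) = 2^(k+1) := by
      rw [Int.shiftRight_eq_div_pow, pow_succ]
      simp
    rw [hshift]
    by_cases hw2 : war < (2:Int)^(k+1)
    · exact ih f war (by omega) hw2
    · rw [not_lt] at hw2
      rw [pv_loop_break f k war hw2]
      have hbl := pv_bitLength_eq_of_bracket war k hw2 hw
      have hge2 : ¬ war < 2 := by
        have : (2:Int) ≤ 2^(k+1) := by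
          calc (2:Int) = 2^1 := by norm_num
          _ ≤ 2^(k+1) := by apply pow_le_pow_right₀ (by norm_num) (by omega)
        omega
      rw [if_neg hge2, hbl]
      norm_num

-- ===== VERDICT (by name: the statement is the Claim_ definition above) =====
theorem get_enemies_spec : Claim_equal_get_enemies := by
  unfold Claim_equal_get_enemies
  intro war hdom
  have hdom' : -2147483648 ≤ war ∧ war ≤ 2147483648 := by
    simpa [Dom_get_enemies, pvDomInt] using hdom
  unfold Spec_get_enemies get_enemies get_enemies_alt
  have hk : war < (2:Int)^(32+1) := by norm_num; omega
  rw [show (8589934592:Int) = 2^(32+1) from by norm_num]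
  rw [pv_loop_char 32 40 war (by norm_num) hk]
  by_cases h2 : war < 2
  · simp [h2]
  · rw [if_neg h2, if_neg h2]
    rw [not_lt] at h2
    have hne : war ≠ 0 := by omega
    have hub : war.natAbs < 2 ^ PySem.Int.bitLength war := PySem.Int.lt_two_pow_bitLength war
    have hlb : 2 ^ (PySem.Int.bitLength war - 1) ≤ war.natAbs := PySem.Int.two_pow_bitLength_le war hne
    set bl := PySem.Int.bitLength war with hbl
    have hna : war.natAbs ≤ 2147483648 := by omega
    have hbd : bl ≤ 32 := by
      by_contra h
      have h1 : (2:Nat)^32 ≤ 2^(bl-1) := Nat.pow_le_pow_right (by norm_num) (by omega)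
      have h2' : (2:Nat)^32 ≤ war.natAbs := le_trans h1 hlb
      norm_num at h2'
      omega
    have hpos : 1 ≤ bl := by
      by_contra h
      have hb0 : bl = 0 := by omega
      rw [hb0] at hub
      simp at hub
      omega
    have hsh : (1:Int) <<< (bl - 1) = 2^(bl-1) := by
      rw [Int.shiftLeft_eq]
      simp
    rw [hsh]
    have hmin : min ((2:Int)^(32+1)) (2^(bl-1)) = 2^(bl-1) := by
      apply min_eq_right
      apply pow_le_pow_right₀ (by norm_num) (by omega)
    rw [hmin]
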